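-- pv_equiv track=rewrite | github.com/sebastianardelean/molecular_docking | work/quantum/.ipynb_checkpoints/qgamho_gc_grover-checkpoint.py | recreate_individual
-- ===== SOURCE A (Python) =====
-- METAHEURISTIC_GENE_LENGTH:int = 5
--
-- COLOR_LIST = [(0,0),(0,1),(1,0),(1,1)]
--
-- NO_OF_NODES = 5
--
-- def pairs_colors(colors_list):
--     """
--     Function returns a list of colors from the binary representation of the individual
--     :param colors_list: binary representation of the individual
--     :returns: list of pairs representing the color configuration for each node.
--     """
--     pairs=list()
--     for i in range(0,len(colors_list),2):
--         pairs.append((colors_list[i],colors_list[i+1]))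
--     return pairs
--
-- def recreate_individual(individual_mho, individual_binary):
--     colors = pairs_colors(individual_binary)
--     solution = [(0,0,False) for _ in range(0,NO_OF_NODES)]
--     if METAHEURISTIC_GENE_LENGTH == 0:
--         return colors
--     for gene in individual_mho:
--         color = gene %10
--         color = COLOR_LIST[color]
--         node = gene // 10
--         node = node - 1
--         solution[node]=(color[0],color[1],True)
--
--     for gene in colors:
--         for i in range(0,len(solution)):
--             value = solution[i]
--             if value[2]==False:
--                 new_value = (gene[0],gene[1],True)
--                 solution[i]=new_value
--                 break
--     return list(map(lambda x: (x[0],x[1]), solution))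
-- ===== SOURCE B (Python) =====
-- METAHEURISTIC_GENE_LENGTH: int = 5
--
-- COLOR_LIST = [(0, 0), (0, 1), (1, 0), (1, 1)]
--
-- NO_OF_NODES = 5
--
--
-- def pairs_colors(colors_list):
--     """Recursive pairing: take the first two elements, recurse on the rest."""
--     if len(colors_list) < 2:
--         return []
--     return [(colors_list[0], colors_list[1])] + pairs_colors(colors_list[2:])
--
--
-- def recreate_individual(individual_mho, individual_binary):
--     colors = pairs_colors(individual_binary)
--     solution = [(0, 0, False)] * NO_OF_NODES
--     if METAHEURISTIC_GENE_LENGTH == 0: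
--         return colors
--     for gene in individual_mho:
--         color = COLOR_LIST[gene % 10]
--         node = gene // 10 - 1
--         solution[node] = (color[0], color[1], True)
--     holes = [i for i, v in enumerate(solution) if not v[2]]
--     for i, (x, y) in zip(holes, colors):
--         solution[i] = (x, y, True)
--     return [(x, y) for x, y, _ in solution]
-- ===== Notes on version B (the rewrite author's own statement) =====
-- stated objective: simpler
-- what changed: The quadratic second pass (for every color, rescan the solution from index 0 until the first unfilled slot, then break) is replaced by computing the unfilled indices once and assigning colors to them with a single zip, and the index-stepping pairs loop is replaced by structural two-at-a-time recursion. (B returns the filled solution instead of A's IndexError on an odd-length individual_binary, outside Pre_).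
import Mathlib
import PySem

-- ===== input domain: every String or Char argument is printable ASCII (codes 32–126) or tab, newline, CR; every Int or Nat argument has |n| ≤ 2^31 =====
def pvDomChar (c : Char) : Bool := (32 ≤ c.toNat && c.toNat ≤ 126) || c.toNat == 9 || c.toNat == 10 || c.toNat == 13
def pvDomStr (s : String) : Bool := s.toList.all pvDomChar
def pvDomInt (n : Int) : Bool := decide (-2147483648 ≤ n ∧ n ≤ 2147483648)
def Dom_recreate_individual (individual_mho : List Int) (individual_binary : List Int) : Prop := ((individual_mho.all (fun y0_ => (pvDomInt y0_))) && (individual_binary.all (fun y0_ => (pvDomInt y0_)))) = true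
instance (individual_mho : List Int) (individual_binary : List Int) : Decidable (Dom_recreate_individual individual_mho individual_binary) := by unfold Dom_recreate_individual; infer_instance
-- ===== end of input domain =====

-- B replaces A's quadratic "rescan from index 0 with break" hole-filling by a single zip of the
-- precomputed hole indices with the colors, and builds the color pairs by structural recursion
-- (objective: simpler decomposition; same asymptotic cost on these tiny fixed-size solutions).


-- ===== PORT A =====
def pyCOLOR_LIST : List (Int × Int) := [(0, 0), (0, 1), (1, 0), (1, 1)]

-- pairs=[]; for i in range(0, len(colors_list), 2): pairs.append((colors_list[i], colors_list[i+1]))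
def pairs_colors (colors_list : List Int) : List (Int × Int) :=
  (PySem.List.pyRange 0 (PySem.List.len colors_list) 2).foldl
    (fun pairs i => pairs ++ [(PySem.List.pyGetD colors_list i 0, PySem.List.pyGetD colors_list (i + 1) 0)]) []

-- the inner "for i in range(0, len(solution)): … break" of A: replace the first unfilled slot
def fillFirstA : List (Int × Int × Bool) → (Int × Int) → List (Int × Int × Bool)
  | [], _ => []
  | v :: rest, gene =>
      if v.2.2 = false then (gene.1, gene.2, true) :: rest else v :: fillFirstA rest gene

def recreate_individual (individual_mho : List Int) (individual_binary : List Int) : List (Int × Int) :=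
  let colors := pairs_colors individual_binary
  let solution := (PySem.List.pyRange 0 5 1).map (fun _ => ((0 : Int), (0 : Int), false))
  if (5 : Int) = 0 then colors
  else
    let solution := individual_mho.foldl (fun sol gene =>
      let color := PySem.Int.mod gene 10
      let colorPair := PySem.List.pyGetD pyCOLOR_LIST color ((0 : Int), (0 : Int))
      let node := PySem.Int.floordiv gene 10 - 1
      PySem.List.pySetD sol node (colorPair.1, colorPair.2, true)) solution
    let solution := colors.foldl fillFirstA solution
    solution.map (fun x => (x.1, x.2.1))

-- ===== PORT B =====
-- if len(colors_list) < 2: return []; return [(colors_list[0], colors_list[1])] + pairs_colors(colors_list[2:])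
def pairs_colors_B : List Int → List (Int × Int)
  | a :: b :: t => (a, b) :: pairs_colors_B t
  | _ => []

def recreate_individual_alt (individual_mho : List Int) (individual_binary : List Int) : List (Int × Int) :=
  let colors := pairs_colors_B individual_binary
  let solution := PySem.List.pyRepeat [((0 : Int), (0 : Int), false)] 5
  if (5 : Int) = 0 then colors
  else
    let solution := individual_mho.foldl (fun sol gene =>
      let color := PySem.List.pyGetD pyCOLOR_LIST (PySem.Int.mod gene 10) ((0 : Int), (0 : Int))
      let node := PySem.Int.floordiv gene 10 - 1
      PySem.List.pySetD sol node (color.1, color.2, true)) solution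
    let holes := ((PySem.List.enumerate solution).filter (fun p => p.2.2.2 == false)).map (·.1)
    let solution := (holes.zip colors).foldl
      (fun sol p => PySem.List.pySetD sol p.1 (p.2.1, p.2.2, true)) solution
    solution.map (fun x => (x.1, x.2.1))

-- ===== PRECONDITION & SPEC =====
-- Pre_ excludes exactly the inputs where the Python A raises: an odd-length individual_binary
-- (IndexError in pairs_colors), a gene whose color index gene % 10 exceeds 3 (IndexError on
-- COLOR_LIST), and a gene whose node index gene // 10 - 1 falls outside Python's range -5..4
-- for the 5-slot solution (IndexError on assignment).
def Pre_recreate_individual (individual_mho : List Int) (individual_binary : List Int) : Prop :=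
  individual_binary.length % 2 = 0 ∧
  ∀ g ∈ individual_mho, PySem.Int.mod g 10 < 4 ∧
    -5 ≤ PySem.Int.floordiv g 10 - 1 ∧ PySem.Int.floordiv g 10 - 1 ≤ 4
instance (individual_mho : List Int) (individual_binary : List Int) : Decidable (Pre_recreate_individual individual_mho individual_binary) := by unfold Pre_recreate_individual; infer_instance

def pvWitness_recreate_individual : List Int × List Int := ([12, 23], [0, 1, 1, 0])

def Spec_recreate_individual (individual_mho : List Int) (individual_binary : List Int) (out : List (Int × Int)) : Prop := out = recreate_individual_alt individual_mho individual_binary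
instance (individual_mho : List Int) (individual_binary : List Int) (out : List (Int × Int)) : Decidable (Spec_recreate_individual individual_mho individual_binary out) := by unfold Spec_recreate_individual; infer_instance

-- ===== CLAIM (what is proved, stated in full; the proofs are below) =====
def Claim_equal_recreate_individual : Prop := ∀ (individual_mho : List Int) (individual_binary : List Int), Dom_recreate_individual individual_mho individual_binary → Pre_recreate_individual individual_mho individual_binary → Spec_recreate_individual individual_mho individual_binary (recreate_individual individual_mho individual_binary)

-- ===== LEMMAS AND PROOFS =====

-- the common meaning of both second passes: walk the solution, spending colors on unfilled slots
def fillSpec : List (Int × Int × Bool) → List (Int × Int) → List (Int × Int × Bool)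
  | [], _ => []
  | sol, [] => sol
  | v :: rest, c :: cs =>
      if v.2.2 = false then (c.1, c.2, true) :: fillSpec rest cs
      else v :: fillSpec rest (c :: cs)

lemma fillSpec_nil_right (sol : List (Int × Int × Bool)) : fillSpec sol [] = sol := by
  cases sol <;> rfl

lemma foldl_fillFirstA_nil (cs : List (Int × Int)) : cs.foldl fillFirstA [] = [] := by
  induction cs with
  | nil => rfl
  | cons c cs ih => simpa [fillFirstA] using ih

lemma foldl_fillFirstA_filled (v : Int × Int × Bool) (hv : v.2.2 = true) :
    ∀ (cs : List (Int × Int)) (rest : List (Int × Int × Bool)),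
      cs.foldl fillFirstA (v :: rest) = v :: cs.foldl fillFirstA rest := by
  intro cs
  induction cs with
  | nil => intro rest; rfl
  | cons c cs ih =>
      intro rest
      simp [List.foldl_cons, fillFirstA, hv, ih]

lemma afill : ∀ (sol : List (Int × Int × Bool)) (cs : List (Int × Int)),
    cs.foldl fillFirstA sol = fillSpec sol cs := by
  intro sol
  induction sol with
  | nil => intro cs; simp [foldl_fillFirstA_nil, fillSpec]
  | cons v rest ih =>
      intro cs
      by_cases hv : v.2.2 = false
      · cases cs with
        | nil => simp [fillSpec]
        | cons c cs' =>
            have hfilled : ((c.1, c.2, true) : Int × Int × Bool).2.2 = true := rfl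
            simp [List.foldl_cons, fillFirstA, hv, fillSpec,
              foldl_fillFirstA_filled _ hfilled, ih]
      · have hv' : v.2.2 = true := by simpa using hv
        rw [foldl_fillFirstA_filled v hv' cs rest, ih]
        cases cs with
        | nil => simp [fillSpec_nil_right]
        | cons c cs' => simp [fillSpec, hv]

lemma zipfill : ∀ (sol : List (Int × Int × Bool)) (cs : List (Int × Int)) (pre : List (Int × Int × Bool)),
    (((((PySem.List.enumerate sol (pre.length : Int)).filter (fun p => p.2.2.2 == false)).map (·.1)).zip cs).foldl
      (fun s p => PySem.List.pySetD s p.1 (p.2.1, p.2.2, true)) (pre ++ sol)) = pre ++ fillSpec sol cs := by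
  intro sol
  induction sol with
  | nil => intro cs pre; simp [PySem.List.enumerate, fillSpec]
  | cons v rest ih =>
      intro cs pre
      rw [PySem.List.enumerate_cons]
      by_cases hv : v.2.2 = false
      · cases cs with
        | nil => simp [fillSpec_nil_right]
        | cons c cs' =>
            have hset : PySem.List.pySetD (pre ++ v :: rest) (pre.length : Int) ((c.1, c.2, true) : Int × Int × Bool)
                = (pre ++ [((c.1, c.2, true) : Int × Int × Bool)]) ++ rest := by
              rw [PySem.List.pySetD_natCast]
              simp
            have hlen : ((pre.length : Int)) + 1 = (((pre ++ [((c.1, c.2, true) : Int × Int × Bool)]).length : Nat) : Int) := by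
              simp
            simp only [List.filter_cons, hv]
            rw [if_pos (by decide : ((false == false) = true))]
            simp only [List.map_cons, List.zip_cons_cons, List.foldl_cons]
            rw [hset, hlen, ih cs' (pre ++ [((c.1, c.2, true) : Int × Int × Bool)])]
            simp [fillSpec, hv]
      · have hv' : v.2.2 = true := by simpa using hv
        have hlen : ((pre.length : Int)) + 1 = (((pre ++ [v]).length : Nat) : Int) := by simp
        have happ : pre ++ v :: rest = (pre ++ [v]) ++ rest := by simp
        rw [List.filter_cons_of_neg (by simp [hv']), happ, hlen, ih cs (pre ++ [v])]
        cases cs with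
        | nil => simp [fillSpec_nil_right]
        | cons c cs' => simp [fillSpec, hv']

lemma zipfill0 (sol : List (Int × Int × Bool)) (cs : List (Int × Int)) :
    ((((PySem.List.enumerate sol).filter (fun p => p.2.2.2 == false)).map (·.1)).zip cs).foldl
      (fun s p => PySem.List.pySetD s p.1 (p.2.1, p.2.2, true)) sol = fillSpec sol cs := by
  have h := zipfill sol cs []
  simpa using h

lemma pyGetD_cons_cons (a b x : Int) (t : List Int) (i : Int) (hi : 0 ≤ i) :
    PySem.List.pyGetD (a :: b :: t) (i + 2) x = PySem.List.pyGetD t i x := by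
  obtain ⟨k, rfl⟩ : ∃ k : Nat, i = (k : Int) := ⟨i.toNat, (Int.toNat_of_nonneg hi).symm⟩
  have h2 : ((k : Int)) + 2 = (((k + 2 : Nat)) : Int) := by push_cast; ring
  rw [h2, PySem.List.pyGetD_natCast, PySem.List.pyGetD_natCast]
  simp

lemma pairs_point (a b : Int) (t : List Int) (k : Nat) :
    ((fun i => (PySem.List.pyGetD (a :: b :: t) i 0, PySem.List.pyGetD (a :: b :: t) (i + 1) 0))
        ((0 : Int) + 2 * (((k + 1 : Nat)) : Int)))
      = ((fun i => (PySem.List.pyGetD t i 0, PySem.List.pyGetD t (i + 1) 0))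
        ((0 : Int) + 2 * ((k : Nat) : Int))) := by
  simp only []
  have e1 : (0 : Int) + 2 * (((k + 1 : Nat)) : Int) = ((2 * k : Nat) : Int) + 2 := by push_cast; ring
  have e2 : (0 : Int) + 2 * (((k + 1 : Nat)) : Int) + 1 = ((2 * k + 1 : Nat) : Int) + 2 := by push_cast; ring
  have e3 : ((2 * k : Nat) : Int) = 0 + 2 * ((k : Nat) : Int) := by push_cast; ring
  have e4 : ((2 * k + 1 : Nat) : Int) = 0 + 2 * ((k : Nat) : Int) + 1 := by push_cast; ring
  rw [e2, e1, pyGetD_cons_cons _ _ _ _ _ (by positivity), pyGetD_cons_cons _ _ _ _ _ (by positivity), e3, e4]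

lemma pairs_map_len : ∀ (n : Nat) (l : List Int), l.length = n → l.length % 2 = 0 →
    (PySem.List.pyRange 0 (PySem.List.len l) 2).map
      (fun i => (PySem.List.pyGetD l i 0, PySem.List.pyGetD l (i + 1) 0)) = pairs_colors_B l := by
  intro n
  induction n using Nat.strong_induction_on with
  | _ n ih =>
    intro l hn h
    match l with
    | [] =>
        rw [PySem.List.pyRange_of_pos _ _ (by norm_num : (0:Int) < 2)]
        simp [PySem.List.len_eq, pairs_colors_B]
    | [x] => simp at h
    | a :: b :: t =>
        have ht : t.length % 2 = 0 := by simp at h; omega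
        obtain ⟨q, hq⟩ : ∃ q : Nat, t.length = 2 * q := ⟨t.length / 2, by omega⟩
        have hc1 : (if (0:Int) < PySem.List.len (a :: b :: t)
            then ((PySem.List.len (a :: b :: t) - 0 + 2 - 1) / 2).toNat else 0) = q + 1 := by
          simp only [PySem.List.len_eq, List.length_cons, hq]
          rw [if_pos (by push_cast; omega)]
          push_cast
          omega
        have hc2 : (if (0:Int) < PySem.List.len t
            then ((PySem.List.len t - 0 + 2 - 1) / 2).toNat else 0) = q := by
          simp only [PySem.List.len_eq, hq]
          split <;> push_cast <;> omega
        have hcnt : PySem.List.pyRange 0 (PySem.List.len (a :: b :: t)) 2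
            = (List.range (q + 1)).map (fun k : Nat => (0 : Int) + 2 * (k : Int)) := by
          rw [PySem.List.pyRange_of_pos _ _ (by norm_num : (0:Int) < 2), hc1]
        have hcnt' : PySem.List.pyRange 0 (PySem.List.len t) 2
            = (List.range q).map (fun k : Nat => (0 : Int) + 2 * (k : Int)) := by
          rw [PySem.List.pyRange_of_pos _ _ (by norm_num : (0:Int) < 2), hc2]
        have hlt : t.length < n := by
          simp only [List.length_cons] at hn; omega
        have hrec := ih t.length hlt t rfl ht
        rw [hcnt', List.map_map] at hrec
        have hhead : (PySem.List.pyGetD (a :: b :: t) ((0 : Int) + 2 * ((0 : Nat) : Int)) 0,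
            PySem.List.pyGetD (a :: b :: t) ((0 : Int) + 2 * ((0 : Nat) : Int) + 1) 0) = (a, b) := by
          norm_num
          rw [show ((1 : Int)) = (((1 : Nat)) : Int) by norm_num, PySem.List.pyGetD_natCast]
          rfl
        rw [hcnt, List.range_succ_eq_map, List.map_cons, List.map_map, List.map_cons,
          List.map_map, pairs_colors_B, hhead]
        congr 1
        rw [← hrec]
        apply List.map_congr_left
        intro k _
        simp only [Function.comp_apply, Nat.succ_eq_add_one]
        exact pairs_point a b t k

lemma pairs_eq (l : List Int) (h : l.length % 2 = 0) : pairs_colors l = pairs_colors_B l := by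
  unfold pairs_colors
  rw [PySem.List.foldl_append_singleton_eq_map]
  simpa using pairs_map_len l.length l rfl h

-- ===== VERDICT (by name: the statement is the Claim_ definition above) =====
theorem recreate_individual_spec : Claim_equal_recreate_individual := by
  intro individual_mho individual_binary _hdom hpre
  unfold Spec_recreate_individual recreate_individual recreate_individual_alt
  dsimp only
  rw [pairs_eq individual_binary hpre.1]
  have hinit : (PySem.List.pyRange 0 5 1).map (fun _ => ((0 : Int), (0 : Int), false))
      = PySem.List.pyRepeat [((0 : Int), (0 : Int), false)] 5 := by decide
  rw [hinit]
  simp only [if_neg (by decide : ¬ (5 : Int) = 0)]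
  rw [afill, zipfill0]
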